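-- pv_equiv track=rewrite | github.com/VintherWolf/crypto-challenges | code/converter/converter.py | is_padding_needed
-- ===== SOURCE A (Python) =====
-- def is_padding_needed(data):
--
--     pad = b'='
--     padding = 0
--
--     if type(data) is str:
--         data = data.encode()
--     check_data = data
--     # Base64 needs to be 6bits x K, where K is 4 * N, and N is 1 to "infinite"
--     # Check if input which is in 8bit per char
--     # will need padding to fit into 6bits x K
--     while (len(check_data)*8) % 6 != 0:
--         check_data += pad
--         padding += 1
--
--     return padding
-- ===== SOURCE B (Python) =====
-- def is_padding_needed(data):
--     if type(data) is str:
--         data = data.encode()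
--     return (3 - len(data) % 3) % 3
-- ===== Notes on version B (the rewrite author's own statement) =====
-- stated objective: simpler
-- what changed: Replaces the append-and-count while loop over a growing byte string with the closed-form modular formula (3 - len(data) % 3) % 3.
import Mathlib
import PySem

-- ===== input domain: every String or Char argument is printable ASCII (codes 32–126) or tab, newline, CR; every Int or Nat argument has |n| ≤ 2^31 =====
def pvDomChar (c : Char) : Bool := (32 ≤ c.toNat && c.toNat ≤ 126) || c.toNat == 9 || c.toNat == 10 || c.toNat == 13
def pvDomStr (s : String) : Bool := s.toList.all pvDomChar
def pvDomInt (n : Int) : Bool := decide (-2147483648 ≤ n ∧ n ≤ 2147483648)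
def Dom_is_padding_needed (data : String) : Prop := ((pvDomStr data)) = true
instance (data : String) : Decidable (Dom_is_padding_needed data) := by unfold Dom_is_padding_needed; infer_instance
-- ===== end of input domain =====

-- B replaces A's append-and-count while loop with the closed form (3 - len % 3) % 3 (simpler).
-- On Dom (ASCII strings) the byte length of data.encode() equals the character count.

-- ===== PORT A =====
-- A's while loop: check_data only grows by one b'=' per iteration, so only its length matters;
-- ported as the same loop on the current length n with the counter `padding`.
-- `fuel` only bounds the iteration count to make the loop total (3 iterations always
-- suffice: padLoopA_closed_form below); it adds no behaviour.
def padLoopA (fuel : Nat) (n : Nat) (padding : Int) : Int :=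
  match fuel with
  | 0 => padding
  | fuel + 1 =>
      if PySem.Int.mod ((n : Int) * 8) 6 ≠ 0 then padLoopA fuel (n + 1) (padding + 1)
      else padding

def is_padding_needed (data : String) : Int :=
  padLoopA 3 (PySem.Str.len data).toNat 0

-- ===== PORT B =====
def is_padding_needed_alt (data : String) : Int :=
  PySem.Int.mod (3 - PySem.Int.mod (PySem.Str.len data) 3) 3

-- ===== PRECONDITION & SPEC =====
def Spec_is_padding_needed (data : String) (out : Int) : Prop := out = is_padding_needed_alt data
instance (data : String) (out : Int) : Decidable (Spec_is_padding_needed data out) := by unfold Spec_is_padding_needed; infer_instance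

-- ===== CLAIM (what is proved, stated in full; the proofs are below) =====
def Claim_equal_is_padding_needed : Prop := ∀ (data : String), Dom_is_padding_needed data → Spec_is_padding_needed data (is_padding_needed data)

-- ===== LEMMAS AND PROOFS =====

-- the loop condition (len*8) % 6, computed in Nat terms: 8 ≡ 2 (mod 6)
lemma padLoopA_cond (m : Nat) :
    PySem.Int.mod ((m : Int) * 8) 6 = ((m % 3) * 2 : Nat) := by
  have h : PySem.Int.mod (((m * 8 : Nat)) : Int) (((6 : Nat)) : Int) = ((m * 8 % 6 : Nat) : Int) :=
    PySem.Int.mod_natCast (m * 8) 6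
  rw [show m * 8 % 6 = m % 3 * 2 by rw [Nat.mul_mod]; omega] at h
  exact_mod_cast h

-- 3 units of fuel always complete the loop, and the result is the closed form
lemma padLoopA_closed_form (n : Nat) (p : Int) :
    padLoopA 3 n p = p + PySem.Int.mod (3 - PySem.Int.mod (n : Int) 3) 3 := by
  have h1 : PySem.Int.mod ((n : Int)) 3 = ((n % 3 : Nat) : Int) := PySem.Int.mod_natCast n 3
  have h3 : n % 3 = 0 ∨ n % 3 = 1 ∨ n % 3 = 2 := by omega
  rcases h3 with h | h | h
  · have hR : PySem.Int.mod (3 - ((0 : Nat) : Int)) 3 = 0 := by decide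
    simp only [padLoopA, padLoopA_cond, h1, h, hR]
    norm_num
  · have ha : (n + 1) % 3 = 2 := by omega
    have hb : (n + 1 + 1) % 3 = 0 := by omega
    have hR : PySem.Int.mod (3 - ((1 : Nat) : Int)) 3 = 2 := by decide
    simp only [padLoopA, padLoopA_cond, h1, h, ha, hb, hR]
    norm_num
    ring
  · have ha : (n + 1) % 3 = 0 := by omega
    have hR : PySem.Int.mod (3 - ((2 : Nat) : Int)) 3 = 1 := by decide
    simp only [padLoopA, padLoopA_cond, h1, h, ha, hR]
    norm_num

-- ===== VERDICT (by name: the statement is the Claim_ definition above) =====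
theorem is_padding_needed_spec : Claim_equal_is_padding_needed := by
  intro data _
  unfold Spec_is_padding_needed is_padding_needed is_padding_needed_alt
  rw [padLoopA_closed_form]
  have h0 : 0 ≤ PySem.Str.len data := by simp [PySem.Str.len_eq]
  rw [Int.toNat_of_nonneg h0]
  ring
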